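-- pv_equiv track=rewrite | github.com/MohamedAhmedIsmail/SignalProcessing-Package | SignalGenerator.py | SignalDerivative
-- ===== SOURCE A (Python) =====
-- def SignalDerivative(Signal=None):
--     yValues=[y[1] for y in Signal]
--     derivativeList=[]
--     for i in range(len(yValues)):
--         if i==0:
--             derivativeList.append(yValues[i])
--         else:
--             derivativeList.append(yValues[i]-yValues[i-1])
--     return derivativeList
-- ===== SOURCE B (Python) =====
-- def SignalDerivative(Signal=None):
--     def go(prev, rest):
--         if not rest:
--             return []
--         y = rest[0][1]
--         return [y - prev] + go(y, rest[1:])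
--     if not Signal:
--         return []
--     y0 = Signal[0][1]
--     return [y0] + go(y0, Signal[1:])
-- ===== Notes on version B (the rewrite author's own statement) =====
-- stated objective: alternative
-- what changed: Replaces A's two-stage y-value extraction plus index loop with an i==0 branch by a direct structural recursion over the Signal pairs that carries the previous y-value, never building the yValues list or touching indices.
import Mathlib
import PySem

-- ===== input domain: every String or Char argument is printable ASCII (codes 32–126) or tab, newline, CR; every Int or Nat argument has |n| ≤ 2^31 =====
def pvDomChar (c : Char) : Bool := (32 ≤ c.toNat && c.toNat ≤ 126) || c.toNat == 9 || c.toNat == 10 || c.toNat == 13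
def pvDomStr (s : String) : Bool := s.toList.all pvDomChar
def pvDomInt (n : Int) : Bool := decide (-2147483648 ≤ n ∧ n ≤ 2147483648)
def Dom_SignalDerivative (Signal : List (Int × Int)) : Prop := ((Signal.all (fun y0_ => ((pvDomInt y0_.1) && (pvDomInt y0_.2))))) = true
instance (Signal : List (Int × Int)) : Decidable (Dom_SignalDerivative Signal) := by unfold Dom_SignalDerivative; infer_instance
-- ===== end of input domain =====

-- B replaces A's yValues extraction plus index loop (with its i==0 branch) by a direct
-- structural recursion over the Signal pairs carrying the previous y-value (alternative).
-- ===== PORT A =====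
def SignalDerivative (Signal : List (Int × Int)) : List Int :=
  let yValues := Signal.map (fun y => y.2)
  (PySem.List.pyRange 0 yValues.length 1).foldl
    (fun derivativeList i =>
      if i == 0 then derivativeList ++ [PySem.List.pyGetD yValues i 0]
      else derivativeList ++ [PySem.List.pyGetD yValues i 0 - PySem.List.pyGetD yValues (i - 1) 0])
    []

-- ===== PORT B =====
-- helper 'go' from Source B: recursion on the tail, carrying the previous y-value
def pvGo (prev : Int) (rest : List (Int × Int)) : List Int :=
  match rest with
  | [] => []
  | r :: rs => (r.2 - prev) :: pvGo r.2 rs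

def SignalDerivative_alt (Signal : List (Int × Int)) : List Int :=
  match Signal with
  | [] => []
  | s :: rest => s.2 :: pvGo s.2 rest

-- ===== PRECONDITION & SPEC =====
def Spec_SignalDerivative (Signal : List (Int × Int)) (out : List Int) : Prop := out = SignalDerivative_alt Signal
instance (Signal : List (Int × Int)) (out : List Int) : Decidable (Spec_SignalDerivative Signal out) := by unfold Spec_SignalDerivative; infer_instance

-- ===== CLAIM (what is proved, stated in full; the proofs are below) =====
def Claim_equal_SignalDerivative : Prop := ∀ (Signal : List (Int × Int)), Dom_SignalDerivative Signal → Spec_SignalDerivative Signal (SignalDerivative Signal)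

-- ===== LEMMAS AND PROOFS =====

-- A's loop body as a pure function of the index
def pvStep (ys : List Int) (i : Int) : Int :=
  if i == 0 then PySem.List.pyGetD ys i 0
  else PySem.List.pyGetD ys i 0 - PySem.List.pyGetD ys (i - 1) 0

lemma pvA_as_map (ys : List Int) :
    (PySem.List.pyRange 0 ys.length 1).foldl
      (fun derivativeList i =>
        if i == 0 then derivativeList ++ [PySem.List.pyGetD ys i 0]
        else derivativeList ++ [PySem.List.pyGetD ys i 0 - PySem.List.pyGetD ys (i - 1) 0]) []
    = (List.range ys.length).map (fun k : Nat => pvStep ys (k : Int)) := by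
  have hstep : (fun (acc : List Int) (i : Int) =>
      if i == 0 then acc ++ [PySem.List.pyGetD ys i 0]
      else acc ++ [PySem.List.pyGetD ys i 0 - PySem.List.pyGetD ys (i - 1) 0])
      = fun acc i => acc ++ [pvStep ys i] := by
    funext acc i
    unfold pvStep
    split <;> rfl
  rw [hstep, PySem.List.foldl_append_singleton_eq_map, PySem.List.pyRange_zero_natCast,
    List.map_map]
  rfl

-- B's recursion as pairwise differences against the shifted list
lemma pvGo_eq (prev : Int) (rest : List (Int × Int)) :
    pvGo prev rest
      = ((prev :: rest.map (fun p => p.2)).zip (rest.map (fun p => p.2))).map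
          (fun ab => ab.2 - ab.1) := by
  induction rest generalizing prev with
  | nil => rfl
  | cons r rs ih => simp [pvGo, ih r.2]

lemma pv_main (S : List (Int × Int)) :
    (List.range (S.map (fun y => y.2)).length).map
        (fun k : Nat => pvStep (S.map (fun y => y.2)) (k : Int))
      = SignalDerivative_alt S := by
  cases S with
  | nil => rfl
  | cons s rest =>
    set a := s.2 with ha
    set t := rest.map (fun p : Int × Int => p.2) with ht
    show (List.range (a :: t).length).map (fun k : Nat => pvStep (a :: t) (k : Int))
      = a :: pvGo a rest
    rw [pvGo_eq, ← ht]
    apply List.ext_getElem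
    · simp [List.length_zip]
    · intro k hk hk'
      simp only [List.getElem_map, List.getElem_range]
      have hlen : k < t.length + 1 := by simpa using hk
      by_cases hk0 : k = 0
      · subst hk0
        simp [pvStep]
      · have hkz : ((k : Int)) ≠ 0 := by exact_mod_cast hk0
        have hkt : k - 1 < t.length := by
          have : k < ((a :: t).zip t).length + 1 := by simpa using hk'
          simp only [List.length_zip, List.length_cons] at this
          omega
        simp only [pvStep, beq_iff_eq, if_neg hkz]
        have hsub : ((k : Int)) - 1 = ((k - 1 : Nat) : Int) := by omega
        rw [hsub]
        simp only [PySem.List.pyGetD_natCast]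
        rw [List.getD_eq_getElem _ _ hlen,
          List.getD_eq_getElem _ _ (by simp only [List.length_cons]; omega)]
        simp only [List.getElem_cons, hk0, dite_false, List.getElem_map, List.getElem_zip]

-- ===== VERDICT (by name: the statement is the Claim_ definition above) =====
theorem SignalDerivative_spec : Claim_equal_SignalDerivative := by
  intro Signal _
  unfold Spec_SignalDerivative SignalDerivative
  simp only
  rw [pvA_as_map, pv_main]
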